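-- pv_equiv track=rewrite | github.com/Akshei/aoc | aoc10/main.py | splitConnectors
-- ===== SOURCE A (Python) =====
-- def splitConnectors(connectors):
--     result = list()
--     temp = list()
--     for i,j in zip(connectors,connectors[1:]):
--         temp.append(i)
--         if j-i == 3:
--             result.append(temp)
--             temp = list()
--     return result
-- ===== SOURCE B (Python) =====
-- def splitConnectors(connectors):
--     breaks = [k for k in range(len(connectors) - 1)
--               if connectors[k + 1] - connectors[k] == 3]
--     result = []
--     start = 0
--     for b in breaks:
--         result.append(connectors[start:b + 1])
--         start = b + 1
--     return result
-- ===== Notes on version B (the rewrite author's own statement) =====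
-- stated objective: alternative
-- what changed: A builds groups in one pass with a running temp accumulator flushed at each gap of 3; B first computes the list of break indices, then builds the result in a second pass by slicing the input between consecutive breaks.
import Mathlib
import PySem

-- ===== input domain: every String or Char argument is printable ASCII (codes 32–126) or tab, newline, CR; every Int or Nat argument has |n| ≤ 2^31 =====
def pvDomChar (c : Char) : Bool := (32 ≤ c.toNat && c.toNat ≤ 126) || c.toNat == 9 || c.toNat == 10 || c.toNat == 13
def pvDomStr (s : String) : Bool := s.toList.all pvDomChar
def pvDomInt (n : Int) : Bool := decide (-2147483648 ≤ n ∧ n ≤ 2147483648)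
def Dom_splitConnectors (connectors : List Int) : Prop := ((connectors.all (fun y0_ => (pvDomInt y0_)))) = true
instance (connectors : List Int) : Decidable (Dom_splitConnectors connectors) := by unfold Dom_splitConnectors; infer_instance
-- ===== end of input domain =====

-- B replaces A's one-pass accumulator loop by two phases — collect the break indices, then slice
-- between them — an alternative decomposition of the same cost (objective: alternative).

-- ===== PORT A =====
-- literal port of A: fold over zip(connectors, connectors[1:]) carrying (result, temp)
def splitConnectors (connectors : List Int) : List (List Int) :=
  ((connectors.zip (PySem.List.slice connectors (some 1) none)).foldl
    (fun (st : List (List Int) × List Int) (ij : Int × Int) =>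
      let temp := st.2 ++ [ij.1]
      if ij.2 - ij.1 = 3 then (st.1 ++ [temp], ([] : List Int)) else (st.1, temp))
    ([], [])).1

-- ===== PORT B =====
-- literal port of Source B: break indices first, then a slicing pass.
-- connectors[k] for k in range(len-1) is always in range, so pyGetD is exact here.
def splitConnectors_alt (connectors : List Int) : List (List Int) :=
  let breaks : List Int :=
    (PySem.List.pyRange 0 ((connectors.length : Int) - 1) 1).filter
      (fun k => decide (PySem.List.pyGetD connectors (k + 1) 0 - PySem.List.pyGetD connectors k 0 = 3))
  (breaks.foldl
    (fun (st : List (List Int) × Int) b =>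
      (st.1 ++ [PySem.List.slice connectors (some st.2) (some (b + 1))], b + 1))
    ([], 0)).1

-- ===== PRECONDITION & SPEC =====
def Spec_splitConnectors (connectors : List Int) (out : List (List Int)) : Prop := out = splitConnectors_alt connectors
instance (connectors : List Int) (out : List (List Int)) : Decidable (Spec_splitConnectors connectors out) := by unfold Spec_splitConnectors; infer_instance

-- ===== CLAIM (what is proved, stated in full; the proofs are below) =====
def Claim_equal_splitConnectors : Prop := ∀ (connectors : List Int), Dom_splitConnectors connectors → Spec_splitConnectors connectors (splitConnectors connectors)

-- ===== LEMMAS AND PROOFS =====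

-- proof-side names for the two loop bodies (definitionally the lambdas in the ports)
def stepA (st : List (List Int) × List Int) (ij : Int × Int) : List (List Int) × List Int :=
  let temp := st.2 ++ [ij.1]
  if ij.2 - ij.1 = 3 then (st.1 ++ [temp], ([] : List Int)) else (st.1, temp)

def stepB (xs : List Int) (st : List (List Int) × ℕ) (b : ℕ) : List (List Int) × ℕ :=
  (st.1 ++ [(xs.drop st.2).take (b + 1 - st.2)], b + 1)

def stepBInt (xs : List Int) (st : List (List Int) × Int) (b : Int) : List (List Int) × Int :=
  (st.1 ++ [PySem.List.slice xs (some st.2) (some (b + 1))], b + 1)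

lemma splitConnectors_eq (xs : List Int) :
    splitConnectors xs
      = ((xs.zip (PySem.List.slice xs (some 1) none)).foldl stepA ([], [])).1 := rfl

lemma splitConnectors_alt_eq (xs : List Int) :
    splitConnectors_alt xs
      = (((PySem.List.pyRange 0 ((xs.length : Int) - 1) 1).filter
            (fun k => decide (PySem.List.pyGetD xs (k + 1) 0 - PySem.List.pyGetD xs k 0 = 3))).foldl
          (stepBInt xs) ([], 0)).1 := rfl

-- extending a slice by its next element
lemma take_drop_getD (xs : List Int) (a s : ℕ) (h1 : a ≤ s) (h2 : s < xs.length) :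
    (xs.drop a).take (s - a) ++ [xs.getD s 0] = (xs.drop a).take (s + 1 - a) := by
  have h3 : s + 1 - a = (s - a) + 1 := by omega
  rw [h3, List.take_add_one]
  have hlt : s - a < (xs.drop a).length := by simp; omega
  rw [List.getElem?_eq_getElem hlt]
  have : (xs.drop a)[s - a] = xs[s]'h2 := by
    rw [List.getElem_drop]; congr 1; omega
  simp [this, List.getD_eq_getElem?_getD, List.getElem?_eq_getElem h2]

-- A's zip is the pair list indexed by range (n-1)
lemma zip_tail_eq_map_range (xs : List Int) :
    xs.zip xs.tail
      = (List.range (xs.length - 1)).map (fun k => (xs.getD k 0, xs.getD (k+1) 0)) := by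
  apply List.ext_getElem
  · simp [List.length_zip]
  · intro k h1 h2
    have hk : k < xs.length - 1 := by simpa using h2
    have hk1 : k < xs.length := by omega
    have hk2 : k + 1 < xs.length := by omega
    simp [List.getElem_zip, List.getElem_tail,
      List.getD_eq_getElem?_getD, List.getElem?_eq_getElem hk1, List.getElem?_eq_getElem hk2]

-- the heart: A's accumulator loop over indices [s, s+m) equals B's slicing pass over the
-- break indices in [s, s+m), when temp currently holds the slice xs[start:s]
lemma foldA_eq_foldB (xs : List Int) :
    ∀ (m s start : ℕ) (acc : List (List Int)), start ≤ s → s + m < xs.length →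
    (((List.range' s m).map (fun k => (xs.getD k 0, xs.getD (k+1) 0))).foldl stepA
        (acc, (xs.drop start).take (s - start))).1
    = (((List.range' s m).filter (fun k => decide (xs.getD (k+1) 0 - xs.getD k 0 = 3))).foldl
        (stepB xs) (acc, start)).1 := by
  intro m
  induction m with
  | zero => intro s start acc _ _; simp
  | succ m ih =>
    intro s start acc h1 h2
    rw [List.range'_succ, List.map_cons, List.foldl_cons]
    have htake : (xs.drop start).take (s - start) ++ [xs.getD s 0]
        = (xs.drop start).take (s + 1 - start) := take_drop_getD xs start s h1 (by omega)
    by_cases h : xs.getD (s+1) 0 - xs.getD s 0 = 3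
    · rw [List.filter_cons_of_pos (by simpa using h), List.foldl_cons]
      have hstep : stepA (acc, (xs.drop start).take (s - start)) (xs.getD s 0, xs.getD (s+1) 0)
          = (acc ++ [(xs.drop start).take (s + 1 - start)],
             (xs.drop (s+1)).take ((s+1) - (s+1))) := by
        simp only [stepA]
        rw [if_pos h, htake]
        simp
      have hstep2 : stepB xs (acc, start) s
          = (acc ++ [(xs.drop start).take (s + 1 - start)], s + 1) := rfl
      rw [hstep, hstep2]
      exact ih (s+1) (s+1) _ (le_refl _) (by omega)
    · rw [List.filter_cons_of_neg (by simpa using h)]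
      have hstep : stepA (acc, (xs.drop start).take (s - start)) (xs.getD s 0, xs.getD (s+1) 0)
          = (acc, (xs.drop start).take (s + 1 - start)) := by
        simp only [stepA]
        rw [if_neg h, htake]
      rw [hstep]
      exact ih (s+1) start acc (by omega) (by omega)

-- B's Int-indexed slicing pass over cast Nat break indices is the Nat-indexed one
lemma foldB_int_eq_nat (xs : List Int) (K : List ℕ) :
    ∀ (acc : List (List Int)) (st : ℕ),
    ((K.map (fun (n : ℕ) => (n : Int))).foldl (stepBInt xs) (acc, (st : Int))).1
    = (K.foldl (stepB xs) (acc, st)).1 := by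
  induction K with
  | nil => intro acc st; simp
  | cons k K ih =>
    intro acc st
    rw [List.map_cons, List.foldl_cons, List.foldl_cons]
    have h1 : ((k : Int) + 1) = (((k + 1 : ℕ) : Int)) := by push_cast; ring
    have hstep : stepBInt xs (acc, (st : Int)) ((k : Int))
        = (acc ++ [(xs.drop st).take (k + 1 - st)], ((k + 1 : ℕ) : Int)) := by
      simp only [stepBInt]
      rw [h1, PySem.List.slice_natCast]
    have hstep2 : stepB xs (acc, st) k
        = (acc ++ [(xs.drop st).take (k + 1 - st)], k + 1) := rfl
    rw [hstep, hstep2]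
    exact ih (acc ++ [(xs.drop st).take (k + 1 - st)]) (k + 1)

lemma main_eq (xs : List Int) : splitConnectors xs = splitConnectors_alt xs := by
  rcases xs with _ | ⟨x, rest⟩
  · rfl
  set xs := x :: rest with hxs
  have hlen : 1 ≤ xs.length := by simp [hxs]
  rw [splitConnectors_eq, splitConnectors_alt_eq,
    PySem.List.slice_from_one, zip_tail_eq_map_range]
  have hr : PySem.List.pyRange 0 ((xs.length : Int) - 1) 1
      = (List.range (xs.length - 1)).map (fun (n : ℕ) => (n : Int)) := by
    rw [PySem.List.pyRange_one]
    have h2 : (((xs.length : Int) - 1) - 0).toNat = xs.length - 1 := by omega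
    rw [h2]
    simp only [zero_add]
  rw [hr, List.filter_map]
  have hcond : ((fun (k : Int) => decide (PySem.List.pyGetD xs (k + 1) 0 - PySem.List.pyGetD xs k 0 = 3))
        ∘ (fun (n : ℕ) => (n : Int)))
      = fun (k : ℕ) => decide (xs.getD (k+1) 0 - xs.getD k 0 = 3) := by
    funext k
    simp only [Function.comp_apply]
    have h1 : ((k : Int) + 1) = (((k + 1 : ℕ) : Int)) := by push_cast; ring
    rw [h1, PySem.List.pyGetD_natCast, PySem.List.pyGetD_natCast]
  rw [hcond]
  have h0 : ((([], 0) : List (List Int) × Int))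
      = (([], ((0 : ℕ) : Int)) : List (List Int) × Int) := by norm_num
  rw [h0, foldB_int_eq_nat xs (List.filter _ (List.range (xs.length - 1))) [] 0]
  have h00 : (([], ([] : List Int)) : List (List Int) × List Int)
      = ([], (xs.drop 0).take (0 - 0)) := by simp
  rw [h00, List.range_eq_range']
  exact foldA_eq_foldB xs (xs.length - 1) 0 0 [] (le_refl _) (by omega)

-- ===== VERDICT (by name: the statement is the Claim_ definition above) =====
theorem splitConnectors_spec : Claim_equal_splitConnectors := by
  intro xs _
  unfold Spec_splitConnectors
  exact main_eq xs
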